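-- pv_equiv track=rewrite | github.com/ChinaChenp/devtools | interview/interview_python/mianshixinde/lesson1/1.2.py | string_contain
-- ===== SOURCE A (Python) =====
-- def string_contain(str1, str2):
--     hash_map = {}
--     for v in str1:
--         hash_map[ord(v)] = True
--
--     for v in str2:
--         key = ord(v)
--         if key not in hash_map.keys():
--             return False
--     return True
-- ===== SOURCE B (Python) =====
-- def string_contain(str1, str2):
--     a = sorted(ord(c) for c in str1)
--     b = sorted(ord(c) for c in str2)
--     i, n = 0, len(a)
--     for y in b:
--         while i < n and a[i] < y:
--             i += 1
--         if i == n or a[i] > y: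
--             return False
--     return True
-- ===== Notes on version B (the rewrite author's own statement) =====
-- stated objective: alternative
-- what changed: Replaces the hash-map membership test with a sort-then-merge scan: both strings' character ordinals are sorted and walked with two pointers, advancing only the str2 pointer on a match so duplicates reuse it.
import Mathlib
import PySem

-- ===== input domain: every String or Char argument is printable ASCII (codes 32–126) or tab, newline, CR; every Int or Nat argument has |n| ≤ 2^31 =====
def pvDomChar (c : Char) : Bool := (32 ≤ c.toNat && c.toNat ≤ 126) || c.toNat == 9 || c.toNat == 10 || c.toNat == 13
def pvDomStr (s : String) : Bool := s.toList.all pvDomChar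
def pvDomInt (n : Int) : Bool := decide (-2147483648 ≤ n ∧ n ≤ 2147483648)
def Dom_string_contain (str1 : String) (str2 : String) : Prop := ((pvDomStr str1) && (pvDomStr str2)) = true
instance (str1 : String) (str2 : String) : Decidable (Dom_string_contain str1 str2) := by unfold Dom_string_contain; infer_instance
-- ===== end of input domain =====

-- B replaces A's hash-map membership test with a sort-then-merge two-pointer scan; equivalent, no speed claim.

-- ===== PORT A =====
-- the second loop of A: 'for v in str2: if ord(v) not in hash_map.keys(): return False / return True'
def pvCheck (hm : PySem.Dict Int Bool) : List Char → Bool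
  | [] => true
  | v :: rest =>
    if hm.contains ((v.toNat : Int)) = false then false else pvCheck hm rest

def string_contain (str1 : String) (str2 : String) : Bool :=
  let hm := str1.toList.foldl (fun d v => d.insert ((v.toNat : Int)) true) PySem.Dict.empty
  pvCheck hm str2.toList

-- ===== PORT B =====
-- the inner 'while i < n and a[i] < y: i += 1', as dropping the prefix of a below y
def pvSkip (y : Int) : List Int → List Int
  | [] => []
  | x :: r => if x < y then pvSkip y r else x :: r

-- the outer 'for y in b' loop, carrying the rest of a from position i on
def pvWalk : List Int → List Int → Bool
  | _, [] => true
  | a, y :: b' =>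
    match pvSkip y a with
    | [] => false
    | x :: r => if y < x then false else pvWalk (x :: r) b'

def string_contain_alt (str1 : String) (str2 : String) : Bool :=
  let a := PySem.List.sorted (str1.toList.map (fun c => (c.toNat : Int))) (fun x => x) false
  let b := PySem.List.sorted (str2.toList.map (fun c => (c.toNat : Int))) (fun x => x) false
  pvWalk a b

-- ===== PRECONDITION & SPEC =====
def Spec_string_contain (str1 : String) (str2 : String) (out : Bool) : Prop := out = string_contain_alt str1 str2
instance (str1 : String) (str2 : String) (out : Bool) : Decidable (Spec_string_contain str1 str2 out) := by unfold Spec_string_contain; infer_instance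

-- ===== CLAIM (what is proved, stated in full; the proofs are below) =====
def Claim_equal_string_contain : Prop := ∀ (str1 : String) (str2 : String), Dom_string_contain str1 str2 → Spec_string_contain str1 str2 (string_contain str1 str2)

-- ===== LEMMAS AND PROOFS =====

theorem pvCheck_eq_true_iff (hm : PySem.Dict Int Bool) (l : List Char) :
    pvCheck hm l = true ↔ ∀ v ∈ l, hm.contains ((v.toNat : Int)) = true := by
  induction l with
  | nil => simp [pvCheck]
  | cons v rest ih =>
    by_cases h : hm.contains ((v.toNat : Int)) = true
    · simp [pvCheck, h, ih]
    · have hc := eq_false_of_ne_true h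
      constructor
      · intro hf; simp [pvCheck, hc] at hf
      · intro hall; exact absurd (hall v (by simp)) h

theorem string_contain_eq_true_iff (str1 str2 : String) :
    string_contain str1 str2 = true ↔
      ∀ v ∈ str2.toList, (v.toNat : Int) ∈ str1.toList.map (fun c => (c.toNat : Int)) := by
  unfold string_contain
  rw [pvCheck_eq_true_iff]
  have hkeys :
      (str1.toList.foldl (fun d v => d.insert ((v.toNat : Int)) true) PySem.Dict.empty).keys
        = PySem.Set.ofList (str1.toList.map (fun c => (c.toNat : Int))) := by
    rw [PySem.Dict.keys_foldl_insert_key]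
    simp [PySem.Dict.keys_empty, PySem.Set.update_nil_left]
  constructor
  · intro h v hv
    have := h v hv
    rw [PySem.Dict.contains_iff_mem_keys, hkeys, PySem.Set.mem_ofList] at this
    exact this
  · intro h v hv
    rw [PySem.Dict.contains_iff_mem_keys, hkeys, PySem.Set.mem_ofList]
    exact h v hv

theorem pvSkip_head_ge (y : Int) (a : List Int) (x : Int) (r : List Int)
    (h : pvSkip y a = x :: r) : y ≤ x := by
  induction a with
  | nil => simp [pvSkip] at h
  | cons x0 r0 ih =>
    by_cases hx : x0 < y
    · exact ih (by simpa [pvSkip, hx] using h)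
    · simp [pvSkip, hx] at h
      omega

theorem pvSkip_pairwise (y : Int) (a : List Int) (ha : a.Pairwise (· ≤ ·)) :
    (pvSkip y a).Pairwise (· ≤ ·) := by
  induction a with
  | nil => simp [pvSkip]
  | cons x0 r0 ih =>
    by_cases hx : x0 < y
    · exact (by simpa [pvSkip, hx] using ih (List.Pairwise.sublist (List.sublist_cons_self _ _) ha))
    · simpa [pvSkip, hx] using ha

theorem mem_pvSkip (y z : Int) (a : List Int) (ha : a.Pairwise (· ≤ ·)) (hz : y ≤ z) :
    z ∈ pvSkip y a ↔ z ∈ a := by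
  induction a with
  | nil => simp [pvSkip]
  | cons x0 r0 ih =>
    by_cases hx : x0 < y
    · have := ih (List.Pairwise.sublist (List.sublist_cons_self _ _) ha)
      simp only [pvSkip, hx, if_true, this, List.mem_cons]
      constructor
      · exact Or.inr
      · rintro (rfl | h)
        · omega
        · exact h
    · simp [pvSkip, hx]

theorem pvWalk_eq_true_iff (b a : List Int) (ha : a.Pairwise (· ≤ ·)) (hb : b.Pairwise (· ≤ ·)) :
    pvWalk a b = true ↔ ∀ y ∈ b, y ∈ a := by
  induction b generalizing a with
  | nil => simp [pvWalk]
  | cons y b' ih =>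
    have hb' : b'.Pairwise (· ≤ ·) := (List.pairwise_cons.mp hb).2
    have hble : ∀ z ∈ b', y ≤ z := (List.pairwise_cons.mp hb).1
    cases h : pvSkip y a with
    | nil =>
      have hy : y ∉ a := by
        intro hya
        have := (mem_pvSkip y y a ha le_rfl).mpr hya
        simp [h] at this
      simp only [pvWalk, h]
      constructor
      · intro hf; cases hf
      · intro hall; exact absurd (hall y (by simp)) hy
    | cons x r =>
      have hyx : y ≤ x := pvSkip_head_ge y a x r h
      have hsk : (x :: r).Pairwise (· ≤ ·) := h ▸ pvSkip_pairwise y a ha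
      by_cases hlt : y < x
      · have hy : y ∉ a := by
          intro hya
          have hmem : y ∈ x :: r := h ▸ (mem_pvSkip y y a ha le_rfl).mpr hya
          rcases List.mem_cons.mp hmem with rfl | hmr
          · omega
          · have := (List.pairwise_cons.mp hsk).1 y hmr
            omega
        simp only [pvWalk, h, hlt, if_true]
        constructor
        · intro hf; cases hf
        · intro hall; exact absurd (hall y (by simp)) hy
      · have hxy : x = y := by omega
        have hy : y ∈ a := by
          have hmem : y ∈ x :: r := by simp [hxy]
          exact (mem_pvSkip y y a ha le_rfl).mp (h ▸ hmem)
        simp only [pvWalk, h, hlt, if_false]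
        rw [ih (x :: r) hsk hb']
        constructor
        · intro hall z hz
          rcases List.mem_cons.mp hz with rfl | hz'
          · exact hy
          · exact (mem_pvSkip y z a ha (hble z hz')).mp (h ▸ hall z hz')
        · intro hall z hz'
          exact h ▸ (mem_pvSkip y z a ha (hble z hz')).mpr (hall z (List.mem_cons_of_mem _ hz'))

theorem string_contain_alt_eq_true_iff (str1 str2 : String) :
    string_contain_alt str1 str2 = true ↔
      ∀ v ∈ str2.toList, (v.toNat : Int) ∈ str1.toList.map (fun c => (c.toNat : Int)) := by
  unfold string_contain_alt
  rw [pvWalk_eq_true_iff _ _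
      (by simpa using PySem.List.sorted_pairwise (str1.toList.map (fun c => (c.toNat : Int))) (fun x => x))
      (by simpa using PySem.List.sorted_pairwise (str2.toList.map (fun c => (c.toNat : Int))) (fun x => x))]
  constructor
  · intro h v hv
    have := h (v.toNat : Int) (by rw [PySem.List.mem_sorted]; exact List.mem_map_of_mem hv)
    rwa [PySem.List.mem_sorted] at this
  · intro h y hy
    rw [PySem.List.mem_sorted] at hy ⊢
    rcases List.mem_map.mp hy with ⟨v, hv, rfl⟩
    exact h v hv

-- ===== VERDICT (by name: the statement is the Claim_ definition above) =====
theorem string_contain_spec : Claim_equal_string_contain := by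
  intro str1 str2 _
  unfold Spec_string_contain
  rcases hb : string_contain_alt str1 str2 with _ | _
  · rcases ha : string_contain str1 str2 with _ | _
    · rfl
    · exfalso
      have := (string_contain_eq_true_iff str1 str2).mp ha
      have := (string_contain_alt_eq_true_iff str1 str2).mpr this
      rw [hb] at this; cases this
  · exact (string_contain_eq_true_iff str1 str2).mpr
      ((string_contain_alt_eq_true_iff str1 str2).mp hb)
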